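-- pv_equiv track=rewrite | github.com/Maicius/AdvanceAlgorithm | course_exe_4/3.py | calculate
-- ===== SOURCE A (Python) =====
-- def calculate(arr, num):
--     if num == 1:
--         return arr[0]
--     else:
--         val = arr.pop()
--         if val - 1 in arr:
--             arr.remove(val - 1)
--         if len(arr) > 0:
--             return val + calculate(arr, len(arr))
--         else:
--             return val
-- ===== SOURCE B (Python) =====
-- def calculate(arr, num):
--     # Return-value equivalent to A; does NOT mutate arr (A empties it).
--     if num == 1:
--         return arr[0]
--     n = len(arr)
--     pos = {}                     # value -> ascending list of its indices
--     for i in range(n):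
--         pos.setdefault(arr[i], []).append(i)
--     cur = {}                     # value -> cursor into pos[value]: entries before it are dead
--     alive = [True] * n
--     total = 0
--     for r in range(n - 1, -1, -1):
--         if alive[r]:
--             val = arr[r]
--             alive[r] = False
--             total += val
--             lst = pos.get(val - 1)
--             if lst is not None:
--                 c = cur.get(val - 1, 0)
--                 while c < len(lst) and not alive[lst[c]]:
--                     c += 1
--                 if c < len(lst):
--                     alive[lst[c]] = False
--                     c += 1
--                 cur[val - 1] = c
--     return total
-- ===== Notes on version B (the rewrite author's own statement) =====
-- stated objective: faster
-- what changed: A recursively pops the last element and does linear `in`/`remove` scans on a shrinking list (quadratic); B makes one right-to-left pass over a fixed array with an alive mask, a precomputed value->indices dictionary and per-value cursors, so each cancellation finds the first live value-1 index in amortized O(1).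
import Mathlib
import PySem

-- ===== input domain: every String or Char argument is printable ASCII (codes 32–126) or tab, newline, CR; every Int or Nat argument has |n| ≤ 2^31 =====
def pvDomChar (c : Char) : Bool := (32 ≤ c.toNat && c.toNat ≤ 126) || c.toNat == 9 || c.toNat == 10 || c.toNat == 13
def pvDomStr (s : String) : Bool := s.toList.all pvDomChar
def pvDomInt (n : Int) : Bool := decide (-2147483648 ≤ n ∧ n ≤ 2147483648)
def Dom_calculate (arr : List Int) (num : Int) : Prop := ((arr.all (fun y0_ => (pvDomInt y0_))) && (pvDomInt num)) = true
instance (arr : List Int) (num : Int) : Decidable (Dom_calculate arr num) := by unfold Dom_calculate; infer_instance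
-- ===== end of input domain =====

-- B replaces A's quadratic pop/remove recursion by one right-to-left index scan with a
-- positions dictionary and cursors (objective: faster). A empties its argument list in
-- place; B does not mutate it — the equivalence proved here is about the RETURN value only.

-- ===== PORT A =====
-- literal transliteration of A; arr.pop() = PySem.List.pop? (none = IndexError on [], excluded by Pre_)
def calculate (arr : List Int) (num : Int) : Int :=
  if num = 1 then (PySem.List.pyGet? arr 0).getD 0      -- arr[0]; [] is excluded by Pre_
  else
    match hp : PySem.List.pop? arr with
    | none => 0                                         -- IndexError: pop from empty list (outside Pre_)
    | some (val, rest) =>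
      -- if val - 1 in arr: arr.remove(val - 1)
      let rest2 := if (val - 1) ∈ rest then (PySem.List.remove? rest (val - 1)).getD rest else rest
      if rest2.length > 0 then val + calculate rest2 (rest2.length : Int) else val
termination_by arr.length
decreasing_by
  have h1 : rest.length + 1 = arr.length := PySem.List.length_of_pop?_eq_some arr hp
  have h2 : rest2.length ≤ rest.length := by
    simp only [rest2]
    split
    · next hm =>
      rw [PySem.List.remove?_eq_some_erase rest _ hm]
      simpa using List.length_erase_le
    · exact le_rfl
  simp only [rest2] at h2
  omega

-- ===== PORT B =====
-- Source B's inner `while c < len(lst) and not alive[lst[c]]: c += 1`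
def bSkip (alive : List Bool) (lst : List Nat) (c : Nat) : Nat :=
  if c < lst.length then
    if alive.getD (lst.getD c 0) false then c else bSkip alive lst (c + 1)
  else c
termination_by lst.length - c

-- Source B's loop body for one index r (state = (alive, cur, total))
def bStep (arr : List Int) (pos : PySem.Dict Int (List Nat))
    (st : List Bool × PySem.Dict Int Nat × Int) (r : Nat) :
    List Bool × PySem.Dict Int Nat × Int :=
  let alive := st.1
  let cur := st.2.1
  let total := st.2.2
  if alive.getD r false then
    let val := arr.getD r 0
    let alive1 := alive.set r false
    let total1 := total + val
    match pos.get? (val - 1) with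
    | none => (alive1, cur, total1)                       -- lst is None
    | some lst =>
      let c := bSkip alive1 lst (cur.getD (val - 1) 0)
      if c < lst.length then
        (alive1.set (lst.getD c 0) false, cur.insert (val - 1) (c + 1), total1)
      else
        (alive1, cur.insert (val - 1) c, total1)
  else st

-- literal transliteration of Source B; loop indices are Python ints that are provably ≥ 0,
-- ported as Nat; `for r in range(n-1, -1, -1)` is the fold over (List.range n).reverse
def calculate_alt (arr : List Int) (num : Int) : Int :=
  if num = 1 then (PySem.List.pyGet? arr 0).getD 0      -- arr[0]; [] is excluded by Pre_
  else
    let n := arr.length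
    -- pos.setdefault(arr[i], []).append(i)  =  modify (arr[i]) [] (· ++ [i])
    let pos := (List.range n).foldl
      (fun d i => d.modify (arr.getD i 0) [] (fun l => l ++ [i])) PySem.Dict.empty
    let res := ((List.range n).reverse).foldl (bStep arr pos)
      (List.replicate n true, PySem.Dict.empty, 0)
    res.2.2

-- ===== PRECONDITION & SPEC =====
-- A raises IndexError on the empty list (arr[0] when num == 1, arr.pop() otherwise);
-- Pre_ excludes exactly that.
def Pre_calculate (arr : List Int) (num : Int) : Prop := arr ≠ []
instance (arr : List Int) (num : Int) : Decidable (Pre_calculate arr num) := by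
  unfold Pre_calculate; infer_instance

def pvWitness_calculate : List Int × Int := ([3, 2, 4], 3)

def Spec_calculate (arr : List Int) (num : Int) (out : Int) : Prop := out = calculate_alt arr num
instance (arr : List Int) (num : Int) (out : Int) : Decidable (Spec_calculate arr num out) := by
  unfold Spec_calculate; infer_instance

-- ===== CLAIM (what is proved, stated in full; the proofs are below) =====
def Claim_equal_calculate : Prop := ∀ (arr : List Int) (num : Int), Dom_calculate arr num → Pre_calculate arr num → Spec_calculate arr num (calculate arr num)

-- ===== LEMMAS AND PROOFS =====

-- the mathematical content of one round: pop the last element, cancel the first earlier (val-1)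
def specSum (l : List Int) : Int :=
  if h : l = [] then 0
  else
    let val := l.getLast h
    let rest := l.dropLast
    val + specSum (if (val - 1) ∈ rest then rest.erase (val - 1) else rest)
termination_by l.length
decreasing_by
  have h1 : rest.length + 1 = l.length := by
    have : l.length ≠ 0 := by simpa [List.length_eq_zero_iff] using h
    simp only [rest]
    simp [List.length_dropLast]; omega
  simp only [rest] at h1 ⊢
  split
  · have h2 : (l.dropLast.erase (l.getLast h - 1)).length ≤ l.dropLast.length := List.length_erase_le
    omega
  · omega

-- ascending list of the indices of value w in arr
def posL (arr : List Int) (w : Int) : List Nat :=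
  (List.range arr.length).filter (fun i => arr.getD i 0 == w)

-- alive indices / the current list A works on, as a function of B's alive mask
def aliveIdx (arr : List Int) (alive : List Bool) : List Nat :=
  (List.range arr.length).filter (fun i => alive.getD i false)
def aliveVals (arr : List Int) (alive : List Bool) : List Int :=
  (aliveIdx arr alive).map (fun i => arr.getD i 0)

-- cursor invariant: every pos-list entry before the cursor is dead
def CurInv (arr : List Int) (cur : PySem.Dict Int Nat) (alive : List Bool) : Prop :=
  ∀ (v : Int) (j : Nat), j < cur.getD v 0 → j < (posL arr v).length →
    alive.getD ((posL arr v).getD j 0) false = false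

theorem specSum_singleton (x : Int) : specSum [x] = x := by
  rw [specSum]; simp [specSum]

theorem calc_eq_specSum_aux (k : Nat) : ∀ (l : List Int) (num : Int), l.length ≤ k → l ≠ [] → num ≠ 1 →
    calculate l num = specSum l := by
  induction k with
  | zero => intro l num hk hl _; exact absurd (List.length_eq_zero_iff.mp (Nat.le_zero.mp hk)) hl
  | succ k ih =>
    intro l num hk hl hnum
    have hpop : PySem.List.pop? l = some (l.getLast hl, l.dropLast) := by
      conv_lhs => rw [← List.dropLast_append_getLast hl]
      exact PySem.List.pop?_last _ _
    rw [calculate, if_neg hnum, hpop]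
    set val := l.getLast hl with hval
    set rest := l.dropLast with hrest
    have hrlen : rest.length + 1 = l.length := by
      rw [hrest]; have : l.length ≠ 0 := by simpa [List.length_eq_zero_iff] using hl
      simp [List.length_dropLast]; omega
    have hrw : (if (val - 1) ∈ rest then (PySem.List.remove? rest (val - 1)).getD rest else rest)
        = (if (val - 1) ∈ rest then rest.erase (val - 1) else rest) := by
      split
      · next hm => rw [PySem.List.remove?_eq_some_erase rest _ hm]; rfl
      · rfl
    rw [specSum, dif_neg hl]
    simp only [hrw, ← hval, ← hrest]
    set rest2 := (if (val - 1) ∈ rest then rest.erase (val - 1) else rest) with hrest2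
    have hr2len : rest2.length ≤ rest.length := by
      rw [hrest2]; split
      · exact List.length_erase_le
      · exact le_rfl
    by_cases h0 : rest2.length > 0
    · rw [if_pos h0]
      congr 1
      by_cases h1 : rest2.length = 1
      · obtain ⟨x, hx⟩ := List.length_eq_one_iff.mp h1
        rw [hx]
        rw [calculate]
        simp [specSum_singleton]
      · have hne : ((rest2.length : Int)) ≠ 1 := by
          intro hc; exact h1 (by exact_mod_cast hc)
        exact ih rest2 _ (by omega) (by simpa [← List.length_pos_iff] using h0) hne
    · rw [if_neg h0]
      have : rest2 = [] := List.length_eq_zero_iff.mp (by omega)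
      rw [this, specSum]
      simp


-- pointwise effect of alive[k] = False
theorem getD_set_false (alive : List Bool) (k i : Nat) :
    (alive.set k false).getD i false = if i = k then false else alive.getD i false := by
  simp only [List.getD_eq_getElem?_getD, List.getElem?_set]
  by_cases h : i = k
  · subst h
    rw [if_pos rfl, if_pos rfl]
    by_cases hk : i < alive.length
    · simp [hk]
    · rw [if_neg hk]; rfl
  · rw [if_neg (fun hc => h hc.symm), if_neg h]

theorem dead_mono (alive : List Bool) (k i : Nat) (h : alive.getD i false = false) :
    (alive.set k false).getD i false = false := by
  rw [getD_set_false]; split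
  · rfl
  · exact h

theorem mem_posL (arr : List Int) (w : Int) (i : Nat) :
    i ∈ posL arr w ↔ i < arr.length ∧ arr.getD i 0 = w := by
  simp [posL, List.mem_filter, List.mem_range]

theorem pairwise_posL (arr : List Int) (w : Int) : (posL arr w).Pairwise (· < ·) :=
  List.Pairwise.filter _ List.pairwise_lt_range

-- removing a key from a Nodup list, through filter
theorem filter_ite_false_eq_erase (k : Nat) (p : Nat → Bool) (l : List Nat) (hl : l.Nodup) :
    l.filter (fun i => if i = k then false else p i) = (l.filter p).erase k := by
  rw [List.Nodup.erase_eq_filter (List.Nodup.filter p hl), List.filter_filter]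
  apply List.filter_congr
  intro i _
  by_cases h : i = k <;> simp [h]

theorem aliveIdx_set (arr : List Int) (alive : List Bool) (k : Nat) :
    aliveIdx arr (alive.set k false) = (aliveIdx arr alive).erase k := by
  unfold aliveIdx
  have h1 : (List.range arr.length).filter (fun i => (alive.set k false).getD i false)
      = (List.range arr.length).filter (fun i => if i = k then false else alive.getD i false) := by
    apply List.filter_congr
    intro i _
    exact getD_set_false alive k i
  rw [h1, filter_ite_false_eq_erase k _ _ List.nodup_range]

-- with everything at r and above dead and r itself alive, the alive indices split at r
theorem aliveIdx_split (arr : List Int) (alive : List Bool) (r : Nat) (hr : r < arr.length)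
    (halive : alive.getD r false = true)
    (hdead : ∀ i, r + 1 ≤ i → alive.getD i false = false) :
    aliveIdx arr alive
      = (List.range r).filter (fun i => alive.getD i false) ++ [r] := by
  unfold aliveIdx
  have hn : arr.length = (r + 1) + (arr.length - (r + 1)) := by omega
  rw [hn, List.range_add, List.filter_append]
  have h2 : (List.filter (fun i => alive.getD i false)
      (List.map (fun x => r + 1 + x) (List.range (arr.length - (r + 1))))) = [] := by
    rw [List.filter_eq_nil_iff]
    intro a ha
    obtain ⟨x, _, hx⟩ := List.mem_map.mp ha
    rw [← hx]
    simpa [List.getD_eq_getElem?_getD] using hdead (r + 1 + x) (by omega)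
  rw [h2, List.append_nil, List.range_succ, List.filter_append]
  have h3 : alive[r]?.getD false = true := by
    simpa [List.getD_eq_getElem?_getD] using halive
  simp [List.getD_eq_getElem?_getD, h3]

-- erasing the first w-valued index commutes with mapping values
theorem map_erase_first (f : Nat → Int) (w : Int) :
    ∀ (l : List Nat), l.Pairwise (· < ·) → ∀ (i0 : Nat), i0 ∈ l → f i0 = w →
      (∀ j ∈ l, f j = w → i0 ≤ j) →
      (l.map f).erase w = (l.erase i0).map f := by
  intro l hp
  induction l with
  | nil => intro i0 h; simp at h
  | cons a t iht =>
    intro i0 hmem hf hmin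
    have hpt : t.Pairwise (· < ·) := hp.of_cons
    by_cases hai : a = i0
    · subst hai
      rw [List.map_cons, hf, List.erase_cons_head, List.erase_cons_head]
    · have hit : i0 ∈ t := by
        rcases List.mem_cons.mp hmem with h | h
        · exact absurd h.symm hai
        · exact h
      have halt : a < i0 := (List.pairwise_cons.mp hp).1 i0 hit
      have hfa : f a ≠ w := by
        intro hc
        have := hmin a (List.mem_cons_self) hc
        omega
      rw [List.map_cons, List.erase_cons_tail (by simp [hfa]),
        List.erase_cons_tail (by simp [fun hc : a = i0 => hai hc]), List.map_cons]
      rw [iht hpt i0 hit hf (fun j hj hw => hmin j (List.mem_cons_of_mem a hj) hw)]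

-- the positions dictionary built by Source B: its getD at w is exactly posL arr w
theorem bPos_getD (arr : List Int) (w : Int) :
    ((List.range arr.length).foldl
      (fun d i => d.modify (arr.getD i 0) [] (fun l => l ++ [i])) PySem.Dict.empty).getD w []
    = posL arr w := by
  have h1 : (List.range arr.length).foldl
      (fun d i => d.modify (arr.getD i 0) [] (fun l => l ++ [i])) PySem.Dict.empty
      = ((List.range arr.length).map (fun i => (arr.getD i 0, i))).foldl
        (fun d p => d.modify p.1 [] (fun l => l ++ [p.2])) PySem.Dict.empty := by
    rw [List.foldl_map]
  rw [h1, PySem.Dict.getD_foldl_modify_append, PySem.Dict.getD_empty, List.nil_append,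
    List.filter_map, List.map_map]
  unfold posL
  simp [Function.comp_def]

-- the inner while loop: skips exactly the dead prefix from c on
theorem bSkip_spec (alive : List Bool) (lst : List Nat) :
    ∀ (fuel c : Nat), lst.length - c ≤ fuel →
      c ≤ bSkip alive lst c ∧
      (∀ j, c ≤ j → j < bSkip alive lst c → j < lst.length ∧
        alive.getD (lst.getD j 0) false = false) ∧
      (bSkip alive lst c < lst.length →
        alive.getD (lst.getD (bSkip alive lst c) 0) false = true) := by
  intro fuel
  induction fuel with
  | zero =>
    intro c hc
    have hcl : lst.length ≤ c := by omega
    rw [bSkip, if_neg (by omega)]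
    exact ⟨le_rfl, fun j h1 h2 => absurd h2 (by omega), fun h => absurd h (by omega)⟩
  | succ fuel ih =>
    intro c hc
    rw [bSkip]
    by_cases h1 : c < lst.length
    · rw [if_pos h1]
      by_cases h2 : alive.getD (lst.getD c 0) false = true
      · rw [if_pos h2]
        exact ⟨le_rfl, fun j ha hb => absurd hb (by omega), fun _ => h2⟩
      · rw [if_neg h2]
        obtain ⟨ih1, ih2, ih3⟩ := ih (c + 1) (by omega)
        refine ⟨by omega, ?_, ih3⟩
        intro j hj1 hj2
        by_cases hjc : j = c
        · subst hjc
          exact ⟨h1, by simpa using h2⟩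
        · exact ih2 j (by omega) hj2
    · rw [if_neg h1]
      exact ⟨le_rfl, fun j ha hb => absurd hb (by omega), fun h => absurd h (by omega)⟩

theorem curInv_set (arr : List Int) (cur : PySem.Dict Int Nat) (alive : List Bool) (k : Nat)
    (h : CurInv arr cur alive) : CurInv arr cur (alive.set k false) := by
  intro v j hj hjl
  exact dead_mono _ _ _ (h v j hj hjl)

theorem specSum_nil : specSum [] = 0 := by rw [specSum]; simp
theorem mem_aliveIdx (arr : List Int) (alive : List Bool) (i : Nat) :
    i ∈ aliveIdx arr alive ↔ i < arr.length ∧ alive.getD i false = true := by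
  simp [aliveIdx, List.mem_filter, List.mem_range]

theorem pairwise_aliveIdx (arr : List Int) (alive : List Bool) :
    (aliveIdx arr alive).Pairwise (· < ·) :=
  List.Pairwise.filter _ List.pairwise_lt_range


theorem bStep_dead (arr : List Int) (pos : PySem.Dict Int (List Nat))
    (alive : List Bool) (cur : PySem.Dict Int Nat) (total : Int) (r : Nat)
    (h : alive.getD r false = false) :
    bStep arr pos (alive, cur, total) r = (alive, cur, total) := by
  unfold bStep; dsimp only; rw [h]; simp

theorem bStep_none (arr : List Int) (pos : PySem.Dict Int (List Nat))
    (alive : List Bool) (cur : PySem.Dict Int Nat) (total : Int) (r : Nat)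
    (h : alive.getD r false = true)
    (hq : pos.get? (arr.getD r 0 - 1) = none) :
    bStep arr pos (alive, cur, total) r = (alive.set r false, cur, total + arr.getD r 0) := by
  unfold bStep; dsimp only; rw [h, hq]; rfl

theorem bStep_hit (arr : List Int) (pos : PySem.Dict Int (List Nat))
    (alive : List Bool) (cur : PySem.Dict Int Nat) (total : Int) (r : Nat) (lst : List Nat)
    (h : alive.getD r false = true)
    (hq : pos.get? (arr.getD r 0 - 1) = some lst)
    (hcl : bSkip (alive.set r false) lst (cur.getD (arr.getD r 0 - 1) 0) < lst.length) :
    bStep arr pos (alive, cur, total) r =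
      ((alive.set r false).set
          (lst.getD (bSkip (alive.set r false) lst (cur.getD (arr.getD r 0 - 1) 0)) 0) false,
        cur.insert (arr.getD r 0 - 1)
          (bSkip (alive.set r false) lst (cur.getD (arr.getD r 0 - 1) 0) + 1),
        total + arr.getD r 0) := by
  unfold bStep; dsimp only; rw [h, hq]; dsimp only; rw [if_pos hcl]; simp

theorem bStep_miss (arr : List Int) (pos : PySem.Dict Int (List Nat))
    (alive : List Bool) (cur : PySem.Dict Int Nat) (total : Int) (r : Nat) (lst : List Nat)
    (h : alive.getD r false = true)
    (hq : pos.get? (arr.getD r 0 - 1) = some lst)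
    (hcl : ¬ bSkip (alive.set r false) lst (cur.getD (arr.getD r 0 - 1) 0) < lst.length) :
    bStep arr pos (alive, cur, total) r =
      (alive.set r false,
        cur.insert (arr.getD r 0 - 1)
          (bSkip (alive.set r false) lst (cur.getD (arr.getD r 0 - 1) 0)),
        total + arr.getD r 0) := by
  unfold bStep; dsimp only; rw [h, hq]; dsimp only; rw [if_neg hcl]; simp


theorem alt_loop (arr : List Int) (r : Nat) (hr : r ≤ arr.length)
    (alive : List Bool) (cur : PySem.Dict Int Nat) (total : Int)
    (hlen : alive.length = arr.length)
    (hdead : ∀ i, r ≤ i → alive.getD i false = false)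
    (hinv : CurInv arr cur alive) :
    (((List.range r).reverse).foldl
        (bStep arr ((List.range arr.length).foldl
          (fun d i => d.modify (arr.getD i 0) [] (fun l => l ++ [i])) PySem.Dict.empty))
        (alive, cur, total)).2.2
      = total + specSum (aliveVals arr alive) := by
  induction r generalizing alive cur total with
  | zero =>
    have hidx : aliveIdx arr alive = [] := by
      unfold aliveIdx
      rw [List.filter_eq_nil_iff]
      intro i _
      simpa [List.getD_eq_getElem?_getD] using hdead i (Nat.zero_le i)
    simp only [List.range_zero, List.reverse_nil, List.foldl_nil]
    rw [aliveVals, hidx]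
    simp [specSum_nil]
  | succ r ih =>
    have hrange : (List.range (r + 1)).reverse = r :: (List.range r).reverse := by
      rw [List.range_succ, List.reverse_append]; simp
    rw [hrange, List.foldl_cons]
    cases halive : alive.getD r false with
    | false =>
      rw [bStep_dead _ _ _ _ _ _ halive]
      refine ih (by omega) alive cur total hlen ?_ hinv
      intro i hi
      by_cases hir : i = r
      · subst hir; exact halive
      · exact hdead i (by omega)
    | true =>
      have hrlt : r < arr.length := by
        by_contra hcon
        have hnone : alive[r]? = none := List.getElem?_eq_none_iff.mpr (by omega)
        rw [List.getD_eq_getElem?_getD, hnone] at halive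
        simp at halive
      have hB : aliveIdx arr alive
          = (List.range r).filter (fun i => alive.getD i false) ++ [r] :=
        aliveIdx_split arr alive r hrlt halive (fun i hi => hdead i (by omega))
      have hA1 : aliveIdx arr (alive.set r false)
          = (List.range r).filter (fun i => alive.getD i false) := by
        rw [aliveIdx_set arr alive r, hB,
          List.erase_append_right _ (fun hmem => by
            have := List.mem_range.mp (List.mem_of_mem_filter hmem)
            omega)]
        simp
      have hlen1 : (alive.set r false).length = arr.length := by simp [hlen]
      have hdead1 : ∀ i, r ≤ i → (alive.set r false).getD i false = false := by
        intro i hi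
        by_cases hir : i = r
        · subst hir; rw [getD_set_false, if_pos rfl]
        · exact dead_mono _ _ _ (hdead i (by omega))
      have hVals : aliveVals arr alive
          = aliveVals arr (alive.set r false) ++ [arr.getD r 0] := by
        unfold aliveVals
        rw [hB, hA1, List.map_append]
        rfl
      have hL : aliveVals arr alive ≠ [] := by rw [hVals]; simp
      have hspec : specSum (aliveVals arr alive)
          = arr.getD r 0 + specSum (if (arr.getD r 0 - 1) ∈ aliveVals arr (alive.set r false) then
              (aliveVals arr (alive.set r false)).erase (arr.getD r 0 - 1)
            else aliveVals arr (alive.set r false)) := by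
        rw [specSum, dif_neg hL]
        simp only [hVals, List.getLast_concat, List.dropLast_concat]
      have hgetD : ((List.range arr.length).foldl
          (fun d i => d.modify (arr.getD i 0) [] (fun l => l ++ [i]))
          PySem.Dict.empty).getD (arr.getD r 0 - 1) [] = posL arr (arr.getD r 0 - 1) :=
        bPos_getD arr (arr.getD r 0 - 1)
      cases hq : ((List.range arr.length).foldl
          (fun d i => d.modify (arr.getD i 0) [] (fun l => l ++ [i]))
          PySem.Dict.empty).get? (arr.getD r 0 - 1) with
      | none =>
        have hpos0 : posL arr (arr.getD r 0 - 1) = [] := by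
          rw [← hgetD, PySem.Dict.getD_eq_get?_getD, hq]
          rfl
        have hnm : (arr.getD r 0 - 1) ∉ aliveVals arr (alive.set r false) := by
          intro hm
          obtain ⟨i, hi, hfi⟩ := List.mem_map.mp hm
          have hi' := (mem_aliveIdx arr (alive.set r false) i).mp hi
          have : i ∈ posL arr (arr.getD r 0 - 1) :=
            (mem_posL arr (arr.getD r 0 - 1) i).mpr ⟨hi'.1, hfi⟩
          rw [hpos0] at this
          exact absurd this (List.not_mem_nil)
        rw [bStep_none _ _ _ _ _ _ halive hq,
          ih (by omega) (alive.set r false) cur (total + arr.getD r 0) hlen1 hdead1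
            (curInv_set arr cur alive r hinv), hspec, if_neg hnm]
        ring
      | some lst =>
        have hlst : lst = posL arr (arr.getD r 0 - 1) := by
          rw [← hgetD]
          exact (PySem.Dict.getD_of_get?_eq_some _ _ hq).symm
        obtain ⟨hcle, hseg, hstop⟩ :=
          bSkip_spec (alive.set r false) lst
            (lst.length - cur.getD (arr.getD r 0 - 1) 0) (cur.getD (arr.getD r 0 - 1) 0) le_rfl
        have hprefix : ∀ j, j < bSkip (alive.set r false) lst (cur.getD (arr.getD r 0 - 1) 0) →
            j < lst.length → (alive.set r false).getD (lst.getD j 0) false = false := by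
          intro j hj hjl
          by_cases hj0 : j < cur.getD (arr.getD r 0 - 1) 0
          · have hjp : j < (posL arr (arr.getD r 0 - 1)).length := by rw [← hlst]; exact hjl
            have hd := hinv (arr.getD r 0 - 1) j hj0 hjp
            rw [← hlst] at hd
            exact dead_mono _ _ _ hd
          · exact (hseg j (by omega) hj).2
        by_cases hcl : bSkip (alive.set r false) lst (cur.getD (arr.getD r 0 - 1) 0) < lst.length
        · have hi0mem : lst.getD (bSkip (alive.set r false) lst (cur.getD (arr.getD r 0 - 1) 0)) 0 ∈ lst := by
            rw [List.getD_eq_getElem _ _ hcl]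
            exact List.getElem_mem hcl
          have hi0memP : lst.getD (bSkip (alive.set r false) lst (cur.getD (arr.getD r 0 - 1) 0)) 0
              ∈ posL arr (arr.getD r 0 - 1) := by
            rw [← hlst]; exact hi0mem
          have hi0 := (mem_posL arr (arr.getD r 0 - 1) _).mp hi0memP
          have hi0alive : (alive.set r false).getD
              (lst.getD (bSkip (alive.set r false) lst (cur.getD (arr.getD r 0 - 1) 0)) 0) false = true :=
            hstop hcl
          have hmin : ∀ j ∈ aliveIdx arr (alive.set r false), arr.getD j 0 = arr.getD r 0 - 1 →
              lst.getD (bSkip (alive.set r false) lst (cur.getD (arr.getD r 0 - 1) 0)) 0 ≤ j := by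
            intro j hj hjv
            have hj' := (mem_aliveIdx arr (alive.set r false) j).mp hj
            have hjmem : j ∈ lst := by
              rw [hlst]; exact (mem_posL arr (arr.getD r 0 - 1) j).mpr ⟨hj'.1, hjv⟩
            obtain ⟨t, ht, hjt⟩ := List.mem_iff_getElem.mp hjmem
            by_cases htc : t < bSkip (alive.set r false) lst (cur.getD (arr.getD r 0 - 1) 0)
            · exfalso
              have hd := hprefix t htc ht
              rw [List.getD_eq_getElem _ _ ht, hjt] at hd
              rw [hj'.2] at hd
              simp at hd
            · by_cases hteq : t = bSkip (alive.set r false) lst (cur.getD (arr.getD r 0 - 1) 0)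
              · subst hteq
                rw [List.getD_eq_getElem _ _ hcl, hjt]
              · have hpw : lst.Pairwise (· < ·) := by
                  rw [hlst]; exact pairwise_posL arr (arr.getD r 0 - 1)
                have hlt : lst[bSkip (alive.set r false) lst (cur.getD (arr.getD r 0 - 1) 0)] < lst[t] :=
                  (List.pairwise_iff_getElem.mp hpw) _ t hcl ht (by omega)
                rw [hjt] at hlt
                rw [List.getD_eq_getElem _ _ hcl]
                omega
          have hmemval : (arr.getD r 0 - 1) ∈ aliveVals arr (alive.set r false) :=
            List.mem_map.mpr ⟨_, (mem_aliveIdx arr (alive.set r false) _).mpr ⟨hi0.1, hi0alive⟩, hi0.2⟩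
          have herase : (aliveVals arr (alive.set r false)).erase (arr.getD r 0 - 1)
              = aliveVals arr ((alive.set r false).set
                  (lst.getD (bSkip (alive.set r false) lst (cur.getD (arr.getD r 0 - 1) 0)) 0) false) := by
            unfold aliveVals
            rw [aliveIdx_set arr (alive.set r false) _,
              map_erase_first (fun i => arr.getD i 0) (arr.getD r 0 - 1)
                (aliveIdx arr (alive.set r false))
                (pairwise_aliveIdx arr (alive.set r false)) _
                ((mem_aliveIdx arr (alive.set r false) _).mpr ⟨hi0.1, hi0alive⟩) hi0.2 hmin]
          have hinv2 : CurInv arr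
              (cur.insert (arr.getD r 0 - 1)
                (bSkip (alive.set r false) lst (cur.getD (arr.getD r 0 - 1) 0) + 1))
              ((alive.set r false).set
                (lst.getD (bSkip (alive.set r false) lst (cur.getD (arr.getD r 0 - 1) 0)) 0) false) := by
            unfold CurInv
            intro v j hj hjl
            by_cases hv : v = arr.getD r 0 - 1
            · subst hv
              rw [PySem.Dict.getD_insert, if_pos rfl] at hj
              rw [← hlst] at hjl ⊢
              by_cases hjc : j < bSkip (alive.set r false) lst (cur.getD (arr.getD r 0 - 1) 0)
              · exact dead_mono _ _ _ (hprefix j hjc hjl)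
              · have hjeq : j = bSkip (alive.set r false) lst (cur.getD (arr.getD r 0 - 1) 0) := by
                  omega
                rw [hjeq, getD_set_false, if_pos rfl]
            · rw [PySem.Dict.getD_insert, if_neg hv] at hj
              exact dead_mono _ _ _ (curInv_set arr cur alive r hinv v j hj hjl)
          have hdead2 : ∀ i, r ≤ i → ((alive.set r false).set
              (lst.getD (bSkip (alive.set r false) lst (cur.getD (arr.getD r 0 - 1) 0)) 0) false).getD
                i false = false :=
            fun i hi => dead_mono _ _ _ (hdead1 i hi)
          have hlen2 : ((alive.set r false).set
              (lst.getD (bSkip (alive.set r false) lst (cur.getD (arr.getD r 0 - 1) 0)) 0) false).length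
                = arr.length := by
            simp [hlen]
          rw [bStep_hit _ _ _ _ _ _ _ halive hq hcl,
            ih (by omega) _ _ _ hlen2 hdead2 hinv2, hspec, if_pos hmemval, herase]
          ring
        · have hnm : (arr.getD r 0 - 1) ∉ aliveVals arr (alive.set r false) := by
            intro hm
            obtain ⟨i, hi, hfi⟩ := List.mem_map.mp hm
            have hi' := (mem_aliveIdx arr (alive.set r false) i).mp hi
            have hjmem : i ∈ lst := by
              rw [hlst]; exact (mem_posL arr (arr.getD r 0 - 1) i).mpr ⟨hi'.1, hfi⟩
            obtain ⟨t, ht, hjt⟩ := List.mem_iff_getElem.mp hjmem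
            have hd := hprefix t (by omega) ht
            rw [List.getD_eq_getElem _ _ ht, hjt, hi'.2] at hd
            simp at hd
          have hinv2 : CurInv arr
              (cur.insert (arr.getD r 0 - 1)
                (bSkip (alive.set r false) lst (cur.getD (arr.getD r 0 - 1) 0))) (alive.set r false) := by
            unfold CurInv
            intro v j hj hjl
            by_cases hv : v = arr.getD r 0 - 1
            · subst hv
              rw [PySem.Dict.getD_insert, if_pos rfl] at hj
              rw [← hlst] at hjl ⊢
              exact hprefix j hj hjl
            · rw [PySem.Dict.getD_insert, if_neg hv] at hj
              exact curInv_set arr cur alive r hinv v j hj hjl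
          rw [bStep_miss _ _ _ _ _ _ _ halive hq hcl,
            ih (by omega) _ _ _ hlen1 hdead1 hinv2, hspec, if_neg hnm]
          ring

-- ===== VERDICT (by name: the statement is the Claim_ definition above) =====
theorem aliveVals_init (arr : List Int) :
    aliveVals arr (List.replicate arr.length true) = arr := by
  have hidx : aliveIdx arr (List.replicate arr.length true) = List.range arr.length := by
    unfold aliveIdx
    rw [List.filter_eq_self]
    intro i hi
    rw [List.getD_replicate true (List.mem_range.mp hi)]
  unfold aliveVals
  rw [hidx]
  apply List.ext_getElem (by simp)
  intro i h1 h2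
  simp only [List.getElem_map, List.getElem_range]
  rw [List.getD_eq_getElem arr 0 h2]

theorem calculate_spec : Claim_equal_calculate := by
  intro arr num _ hpre
  unfold Spec_calculate
  by_cases h1 : num = 1
  · rw [calculate, if_pos h1]
    unfold calculate_alt
    rw [if_pos h1]
  · rw [calc_eq_specSum_aux arr.length arr num le_rfl hpre h1]
    unfold calculate_alt
    rw [if_neg h1]
    dsimp only
    rw [alt_loop arr arr.length le_rfl (List.replicate arr.length true) PySem.Dict.empty 0
      (by simp)
      (fun i hi => by
        rw [List.getD_eq_getElem?_getD, List.getElem?_eq_none_iff.mpr (by simpa using hi)]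
        rfl)
      (fun v j hj _ => by
        rw [PySem.Dict.getD_empty] at hj
        omega)]
    rw [zero_add, aliveVals_init]
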